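-- pv_equiv track=rewrite | github.com/jolieschae/Phase-3-Sims-4-Game-Mod | game/decompile/base/lib/xml/dom/domreg.py | _parse_feature_string
-- ===== SOURCE A (Python) =====
-- def _parse_feature_string(s):
--     features = []
--     parts = s.split()
--     i = 0
--     length = len(parts)
--     while i < length:
--         feature = parts[i]
--         if feature[0] in '0123456789':
--             raise ValueError('bad feature name: %r' % (feature,))
--         i = i + 1
--         version = None
--         if i < length:
--             v = parts[i]
--             if v[0] in '0123456789':
--                 i = i + 1
--                 version = v
--         features.append((feature, version))
--
--     return tuple(features)
-- ===== SOURCE B (Python) =====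
-- def _parse_feature_string(s):
--     # One forward pass over the tokens: a digit-leading token is back-patched
--     # as the version of the immediately preceding un-versioned feature.
--     features = []
--     pending = False
--     for tok in s.split():
--         if tok[:1].isdigit():
--             if not pending:
--                 raise ValueError('bad feature name: %r' % (tok,))
--             name = features[-1][0]
--             features[-1] = (name, tok)
--             pending = False
--         else:
--             features.append((tok, None))
--             pending = True
--     return tuple(features)
-- ===== Notes on version B (the rewrite author's own statement) =====
-- stated objective: simpler
-- what changed: Replaces A's manual index stepping with lookahead (while i < length, reading parts[i+1] and advancing i by 1 or 2) by a single plain for-loop over the tokens that keeps one boolean flag and back-patches the version onto the last appended feature.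
import Mathlib
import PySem

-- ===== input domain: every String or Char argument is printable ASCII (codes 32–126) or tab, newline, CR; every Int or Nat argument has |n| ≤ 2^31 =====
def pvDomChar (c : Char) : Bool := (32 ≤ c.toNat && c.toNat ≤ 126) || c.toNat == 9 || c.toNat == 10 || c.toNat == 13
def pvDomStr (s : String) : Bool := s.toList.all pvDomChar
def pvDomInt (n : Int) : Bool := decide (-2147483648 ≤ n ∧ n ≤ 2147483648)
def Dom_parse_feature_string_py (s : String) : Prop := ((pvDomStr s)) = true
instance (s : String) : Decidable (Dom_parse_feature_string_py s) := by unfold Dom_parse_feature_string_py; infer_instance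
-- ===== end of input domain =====

-- B replaces A's index-stepping lookahead loop by one plain pass with a boolean flag that
-- back-patches the version onto the last appended feature (objective: simpler decomposition).
-- Both Pythons raise ValueError on the same inputs; Pre_ excludes exactly those.

-- ===== PORT A =====
-- `feature[0] in '0123456789'`: split() tokens are nonempty, so feature[0] is the head
-- character; `in` with a 1-char needle is character membership (exact). On the empty
-- token (unreachable from split()) Python would raise IndexError; the port yields false.
def pvDigA (f : String) : Bool :=
  match PySem.Str.pyGet? f 0 with
  | some c => ['0','1','2','3','4','5','6','7','8','9'].contains c
  | none => false

-- the while-loop over parts with index i, recursing on the tokens still to the right of i;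
-- A raises ValueError when a digit-leading token sits in feature position (excluded by Pre_;
-- the port returns [] there, nothing is claimed on those inputs)
def pvAuxA : List String → List (String × Option String)
  | [] => []
  | f :: rest =>
    if pvDigA f then []
    else
      match rest with
      | v :: rest' =>
        if pvDigA v then (f, some v) :: pvAuxA rest'
        else (f, none) :: pvAuxA (v :: rest')
      | [] => [(f, none)]

def parse_feature_string_py (s : String) : List (String × Option String) :=
  pvAuxA (PySem.Str.split₀ s)

-- ===== PORT B =====
-- `tok[:1].isdigit()`, exact on the ASCII domain
def pvDigB (tok : String) : Bool :=
  PySem.Str.strIsdigit (PySem.Str.slice tok none (some 1))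

-- the for-loop body; accumulator kept in reverse (append / features[-1] patch at the head),
-- flag = "previous token was appended as an un-versioned feature".
-- The `not pending` branch is where B's Python raises ValueError (excluded by Pre_).
def pvStepB (st : List (String × Option String) × Bool) (tok : String) :
    List (String × Option String) × Bool :=
  if pvDigB tok then
    if st.2 then
      match st.1 with
      | (name, _) :: rest => ((name, some tok) :: rest, false)
      | [] => ([], false)
    else st
  else ((tok, none) :: st.1, true)

def parse_feature_string_py_alt (s : String) : List (String × Option String) :=
  (((PySem.Str.split₀ s).foldl pvStepB ([], false)).1).reverse

-- ===== PRECONDITION & SPEC =====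
-- Pre_ excludes exactly the inputs on which A (and B) raise ValueError: a whitespace-split
-- token sequence whose first token starts with a digit, or with two consecutive
-- digit-leading tokens.
def Pre_parse_feature_string_py (s : String) : Prop :=
  (∀ t ∈ (PySem.Str.split₀ s).head?, pvDigA t = false) ∧
  List.IsChain (fun a b => pvDigA a = true → pvDigA b = false) (PySem.Str.split₀ s)
instance (s : String) : Decidable (Pre_parse_feature_string_py s) := by
  unfold Pre_parse_feature_string_py; infer_instance

def pvWitness_parse_feature_string_py : String := "dom 2 io 1 spam"

def Spec_parse_feature_string_py (s : String) (out : List (String × Option String)) : Prop :=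
  out = parse_feature_string_py_alt s
instance (s : String) (out : List (String × Option String)) :
    Decidable (Spec_parse_feature_string_py s out) := by
  unfold Spec_parse_feature_string_py; infer_instance

-- ===== CLAIM (what is proved, stated in full; the proofs are below) =====
def Claim_equal_parse_feature_string_py : Prop :=
  ∀ (s : String), Dom_parse_feature_string_py s → Pre_parse_feature_string_py s →
    Spec_parse_feature_string_py s (parse_feature_string_py s)

-- ===== LEMMAS AND PROOFS =====

-- the two digit tests agree: '0' ≤ c ≤ '9' iff c is one of the ten digit characters
theorem pvDig_eq (t : String) : pvDigB t = pvDigA t := by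
  unfold pvDigA pvDigB
  rw [PySem.Str.strIsdigit_eq, PySem.Str.toList_slice, PySem.Chars.slice_eq_listSlice]
  have hslice : PySem.List.slice t.toList none (some 1) = t.toList.take 1 := by
    simp [PySem.List.slice]
  rw [hslice, PySem.Str.pyGet?_eq, PySem.Chars.pyGet?_eq_listPyGet?]
  cases h : t.toList with
  | nil => simp [PySem.Chars.strIsdigit, PySem.List.pyGet?, PySem.List.pyIdx?]
  | cons c cs =>
    have hget : PySem.List.pyGet? (c :: cs) (0 : Int) = some c := by
      simp [PySem.List.pyGet?, PySem.List.pyIdx?]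
    rw [hget]
    simp only [List.take_succ_cons, List.take_zero, PySem.Chars.strIsdigit, List.isEmpty_cons,
      List.all_cons, List.all_nil, Bool.not_false, Bool.true_and, Bool.and_true]
    rw [Bool.eq_iff_iff, PySem.Chars.isdigit]
    simp only [List.contains_eq_mem, List.mem_cons, List.not_mem_nil, or_false,
      Char.le_def, Char.ext_iff, UInt32.le_iff_toNat_le, UInt32.ext_iff,
      decide_eq_true_iff, Bool.and_eq_true]
    have h0 : ('0').val.toNat = 48 := by decide
    have h1 : ('1').val.toNat = 49 := by decide
    have h2 : ('2').val.toNat = 50 := by decide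
    have h3 : ('3').val.toNat = 51 := by decide
    have h4 : ('4').val.toNat = 52 := by decide
    have h5 : ('5').val.toNat = 53 := by decide
    have h6 : ('6').val.toNat = 54 := by decide
    have h7 : ('7').val.toNat = 55 := by decide
    have h8 : ('8').val.toNat = 56 := by decide
    have h9 : ('9').val.toNat = 57 := by decide
    omega

-- main invariant: running B's fold from (acc, false) on a good token list prepends the
-- reversed A-output; from ((f, none) :: acc, true) it behaves like A on f :: tokens.
theorem pvFold_inv : ∀ (ts : List String),
    List.IsChain (fun a b => pvDigA a = true → pvDigA b = false) ts →
    ((∀ t ∈ ts.head?, pvDigA t = false) →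
      ∀ acc, (ts.foldl pvStepB (acc, false)).1 = (pvAuxA ts).reverse ++ acc)
    ∧ (∀ f, pvDigA f = false →
      ∀ acc, (ts.foldl pvStepB ((f, none) :: acc, true)).1 = (pvAuxA (f :: ts)).reverse ++ acc) := by
  intro ts
  induction ts with
  | nil =>
    intro _
    refine ⟨fun _ acc => by simp [pvAuxA], fun f hf acc => by simp [pvAuxA, hf]⟩
  | cons v rest ih =>
    intro hch
    have hrest : List.IsChain (fun a b => pvDigA a = true → pvDigA b = false) rest := hch.tail
    obtain ⟨ihA, ihB⟩ := ih hrest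
    constructor
    · intro hhd acc
      have hv : pvDigA v = false := hhd v rfl
      have hstep : pvStepB (acc, false) v = ((v, none) :: acc, true) := by
        simp [pvStepB, pvDig_eq, hv]
      rw [List.foldl_cons, hstep]
      exact ihB v hv acc
    · intro f hf acc
      by_cases hv : pvDigA v = true
      · have hstep : pvStepB ((f, none) :: acc, true) v = ((f, some v) :: acc, false) := by
          simp [pvStepB, pvDig_eq, hv]
        rw [List.foldl_cons, hstep]
        have hhd : ∀ t ∈ rest.head?, pvDigA t = false := by
          cases rest with
          | nil => intro t ht; simp at ht
          | cons w rest' =>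
            intro t ht
            simp only [List.head?_cons, Option.mem_some_iff] at ht
            subst ht
            exact (List.isChain_cons_cons.mp hch).1 hv
        rw [ihA hhd ((f, some v) :: acc)]
        simp [pvAuxA, hf, hv]
      · have hv' : pvDigA v = false := by simpa using hv
        have hstep : pvStepB ((f, none) :: acc, true) v = ((v, none) :: (f, none) :: acc, true) := by
          simp [pvStepB, pvDig_eq, hv']
        rw [List.foldl_cons, hstep]
        rw [ihB v hv' ((f, none) :: acc)]
        have : pvAuxA (f :: v :: rest) = (f, none) :: pvAuxA (v :: rest) := by
          simp [pvAuxA, hf, hv']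
        rw [this]
        simp

-- ===== VERDICT (by name: the statement is the Claim_ definition above) =====
theorem parse_feature_string_py_spec : Claim_equal_parse_feature_string_py := by
  intro s _ hpre
  unfold Spec_parse_feature_string_py parse_feature_string_py parse_feature_string_py_alt
  rw [(pvFold_inv (PySem.Str.split₀ s) hpre.2).1 hpre.1 []]
  simp
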